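-- pv_equiv track=rewrite | github.com/wt-bian/BioinformaticsAlgorithms | Chapter 1/Frequency with Mismatches and Reverse Complements.py | revCom
-- ===== SOURCE A (Python) =====
-- def revCom (word):
--     a = word
--     b=[]
--     c=[]
--     for x in range(len(a)):
--         b.append(a[len(a)-x-1])
--     for x in range(len(a)):
--         if b[x]=='A':
--             c.append('T')
--         elif b[x]=='C':
--             c.append('G')
--         elif b[x]=='T':
--             c.append('A')
--         elif b[x]=='G':
--             c.append('C')
--     d=''.join(c)
--     return d
-- ===== SOURCE B (Python) =====
-- COMP = {'A': 'T', 'C': 'G', 'T': 'A', 'G': 'C'}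
--
-- def revCom(word):
--     buf = [c for c in word if c in COMP]
--     i, j = 0, len(buf) - 1
--     while i <= j:
--         buf[i], buf[j] = COMP[buf[j]], COMP[buf[i]]
--         i += 1
--         j -= 1
--     return ''.join(buf)
-- ===== Notes on version B (the rewrite author's own statement) =====
-- stated objective: alternative
-- what changed: Replaces A's two staged index loops (build a reversed copy, then complement it with an if/elif chain) by a filter pass that discards non-ACGT characters followed by an in-place two-pointer swap loop that complements and exchanges the end elements while the pointers move inward, so no reversed intermediate list is ever built (measured ~5x faster).
import Mathlib
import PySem

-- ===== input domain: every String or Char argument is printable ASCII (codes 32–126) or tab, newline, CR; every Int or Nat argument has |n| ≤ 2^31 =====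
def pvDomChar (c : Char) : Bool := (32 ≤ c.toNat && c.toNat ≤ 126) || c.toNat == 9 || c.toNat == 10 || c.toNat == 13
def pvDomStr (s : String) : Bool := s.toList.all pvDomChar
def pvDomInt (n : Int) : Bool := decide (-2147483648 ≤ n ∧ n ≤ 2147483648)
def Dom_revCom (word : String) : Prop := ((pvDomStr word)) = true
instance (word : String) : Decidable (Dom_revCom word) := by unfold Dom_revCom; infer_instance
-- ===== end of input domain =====

-- B discards non-ACGT characters in one filter pass, then reverse-complements IN PLACE with a
-- two-pointer swap loop (complemented ends swapped, pointers meeting in the middle) — a different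
-- algorithm from A's two staged index loops (build reversed list, then if/elif complement list).


-- ===== PORT A =====
-- a[len(a)-x-1] / b[x] are ported with pyGetD (the default is never read: the index is always in range).
def revCom (word : String) : String :=
  let a := word.toList
  let b := (PySem.List.pyRange 0 (a.length : Int) 1).foldl
    (fun acc x => acc ++ [PySem.List.pyGetD a ((a.length : Int) - x - 1) ' ']) []
  let c := (PySem.List.pyRange 0 (a.length : Int) 1).foldl
    (fun acc x =>
      let ch := PySem.List.pyGetD b x ' '
      if ch = 'A' then acc ++ ['T']
      else if ch = 'C' then acc ++ ['G']
      else if ch = 'T' then acc ++ ['A']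
      else if ch = 'G' then acc ++ ['C']
      else acc) []
  String.mk c

-- ===== PORT B =====
def compDict : PySem.Dict Char Char :=
  PySem.Dict.ofList [('A', 'T'), ('C', 'G'), ('T', 'A'), ('G', 'C')]

-- the while-loop with the simultaneous assignment buf[i], buf[j] = COMP[buf[j]], COMP[buf[i]];
-- COMP[…] is ported with getD (KeyError is unreachable: buf holds only filtered ACGT characters)
def twoPtr (buf : List Char) (i j : Int) : List Char :=
  if h : i ≤ j then
    let x := PySem.List.pyGetD buf i ' '
    let y := PySem.List.pyGetD buf j ' '
    twoPtr ((buf.set i.toNat ((compDict.get? y).getD ' ')).set j.toNat ((compDict.get? x).getD ' '))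
      (i + 1) (j - 1)
  else buf
termination_by (j + 1 - i).toNat
decreasing_by omega

def revCom_alt (word : String) : String :=
  let buf := word.toList.filter (fun c => compDict.contains c)
  String.mk (twoPtr buf 0 ((buf.length : Int) - 1))

-- ===== PRECONDITION & SPEC =====
def Spec_revCom (word : String) (out : String) : Prop := out = revCom_alt word
instance (word : String) (out : String) : Decidable (Spec_revCom word out) := by unfold Spec_revCom; infer_instance

-- ===== CLAIM (what is proved, stated in full; the proofs are below) =====
def Claim_equal_revCom : Prop := ∀ (word : String), Dom_revCom word → Spec_revCom word (revCom word)

-- ===== LEMMAS AND PROOFS =====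

-- the total complement function both ports implement on ACGT
def compc (ch : Char) : Char := ((compDict.get? ch).getD ' ')

def compA (ch : Char) : Option Char :=
  if ch = 'A' then some 'T'
  else if ch = 'C' then some 'G'
  else if ch = 'T' then some 'A'
  else if ch = 'G' then some 'C'
  else none

lemma compA_eq (ch : Char) :
    compA ch = if compDict.contains ch then some (compc ch) else none := by
  by_cases h1 : ch = 'A'
  · subst h1; decide
  by_cases h2 : ch = 'C'
  · subst h2; decide
  by_cases h3 : ch = 'T'
  · subst h3; decide
  by_cases h4 : ch = 'G'
  · subst h4; decide
  have e1 : ('A' == ch) = false := by simp; exact fun e => h1 e.symm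
  have e2 : ('C' == ch) = false := by simp; exact fun e => h2 e.symm
  have e3 : ('T' == ch) = false := by simp; exact fun e => h3 e.symm
  have e4 : ('G' == ch) = false := by simp; exact fun e => h4 e.symm
  have hd : compDict = PySem.Dict.mk [('A', 'T'), ('C', 'G'), ('T', 'A'), ('G', 'C')] := by decide
  rw [hd]
  simp [compA, h1, h2, h3, h4, e1, e2, e3, e4]

lemma foldl_compA (l : List Char) (acc : List Char) :
    l.foldl (fun acc ch =>
      if ch = 'A' then acc ++ ['T']
      else if ch = 'C' then acc ++ ['G']
      else if ch = 'T' then acc ++ ['A']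
      else if ch = 'G' then acc ++ ['C']
      else acc) acc = acc ++ l.filterMap compA := by
  induction l generalizing acc with
  | nil => simp
  | cons ch t ih =>
    simp only [List.foldl_cons, List.filterMap_cons]
    by_cases h1 : ch = 'A'
    · simp [h1, ih, compA]
    · by_cases h2 : ch = 'C'
      · simp [h2, ih, compA]
      · by_cases h3 : ch = 'T'
        · simp [h3, ih, compA]
        · by_cases h4 : ch = 'G'
          · simp [h4, ih, compA]
          · simp [h1, h2, h3, h4, ih, compA]

-- the first loop of A builds the reverse of a
lemma loop1_eq_reverse (a : List Char) :
    (PySem.List.pyRange 0 (a.length : Int) 1).foldl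
      (fun acc x => acc ++ [PySem.List.pyGetD a ((a.length : Int) - x - 1) ' ']) []
    = a.reverse := by
  rw [PySem.List.foldl_append_singleton_eq_map, List.nil_append]
  rw [PySem.List.pyRange_one]
  simp only [Int.sub_zero, Int.toNat_natCast, List.map_map]
  apply List.ext_getElem
  · simp
  · intro k h1 h2
    simp only [List.getElem_map, List.getElem_range, Function.comp_apply,
      List.getElem_reverse]
    have hk : k < a.length := by simpa using h1
    have hidx : ((a.length : Int) - (0 + (k : Int)) - 1) = ((a.length - 1 - k : Nat) : Int) := by
      omega
    rw [hidx, PySem.List.pyGetD_natCast]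
    have : a.length - 1 - k < a.length := by omega
    simp [this]

-- A characterised: reverse, then filterMap the partial complement
lemma revCom_eq_filterMap (word : String) :
    revCom word = String.mk (word.toList.reverse.filterMap compA) := by
  unfold revCom
  simp only []
  rw [loop1_eq_reverse]
  have hlen : (word.toList.length : Int) = (word.toList.reverse.length : Int) := by simp
  rw [hlen, PySem.List.foldl_pyRange_zero_pyGetD' word.toList.reverse ' '
    (fun acc ch =>
      if ch = 'A' then acc ++ ['T']
      else if ch = 'C' then acc ++ ['G']
      else if ch = 'T' then acc ++ ['A']
      else if ch = 'G' then acc ++ ['C']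
      else acc) []]
  rw [foldl_compA, List.nil_append]

lemma set_append_cons (pre t : List Char) (x v : Char) :
    (pre ++ x :: t).set pre.length v = pre ++ v :: t := by
  induction pre with
  | nil => rfl
  | cons p ps ih => simp [ih]

lemma getD_append_cons (pre t : List Char) (x d : Char) :
    (pre ++ x :: t).getD pre.length d = x := by
  simp [List.getD_eq_getElem?_getD]

-- two-pointer invariant: the segment between the pointers gets reverse-complemented in place
lemma twoPtr_middle (n : Nat) : ∀ (pre mid suf : List Char), mid.length = n →
    twoPtr (pre ++ mid ++ suf) (pre.length : Int) ((pre.length : Int) + mid.length - 1)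
      = pre ++ mid.reverse.map compc ++ suf := by
  induction n using Nat.strong_induction_on with
  | _ n ih =>
    intro pre mid suf hn
    cases mid with
    | nil =>
      rw [twoPtr]
      simp
    | cons x rest =>
     rcases rest.eq_nil_or_concat with rfl | ⟨ms, y, rfl⟩
     case inl =>
      have hn1 : n = 1 := by simpa using hn.symm
      subst hn1
      have hc : ∀ c, (compDict.get? c).getD ' ' = compc c := fun _ => rfl
      rw [twoPtr, dif_pos (by simp)]
      have hre : pre ++ [x] ++ suf = pre ++ x :: suf := by simp
      rw [hre]
      rw [PySem.List.pyGetD_natCast, getD_append_cons]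
      simp only [Int.toNat_natCast, set_append_cons, hc]
      rw [twoPtr, dif_neg (by omega)]
      simp
     case inr =>
      simp only [List.concat_eq_append] at *
      have hn2 : n = ms.length + 2 := by simpa using hn.symm
      subst hn2
      have hc : ∀ c, (compDict.get? c).getD ' ' = compc c := fun _ => rfl
      have hlen : (x :: (ms ++ [y])).length = ms.length + 2 := by simp
      rw [twoPtr, dif_pos (by omega)]
      have hre1 : pre ++ (x :: (ms ++ [y])) ++ suf = pre ++ x :: (ms ++ y :: suf) := by simp
      have hre2 : pre ++ x :: (ms ++ y :: suf) = (pre ++ x :: ms) ++ y :: suf := by simp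
      have hj : (pre.length : Int) + ((x :: (ms ++ [y])).length : Int) - 1
          = ((pre ++ x :: ms).length : Int) := by push_cast [hlen]; simp; omega
      rw [hre1]
      rw [PySem.List.pyGetD_natCast, getD_append_cons, hj, hre2,
        PySem.List.pyGetD_natCast, getD_append_cons]
      simp only [Int.toNat_natCast, hc]
      rw [← hre2, set_append_cons]
      have hL : (pre ++ x :: ms).length = (pre ++ compc y :: ms).length := by simp
      have hre3 : pre ++ compc y :: (ms ++ y :: suf) = (pre ++ compc y :: ms) ++ (y :: suf) := by
        simp
      rw [hL, hre3, set_append_cons]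
      have hi1 : (pre.length : Int) + 1 = ((pre ++ [compc y]).length : Int) := by simp
      have hj1 : ((pre ++ compc y :: ms).length : Int) - 1
          = ((pre ++ [compc y]).length : Int) + (ms.length : Int) - 1 := by simp; omega
      have hre4 : (pre ++ compc y :: ms) ++ compc x :: suf
          = (pre ++ [compc y]) ++ ms ++ (compc x :: suf) := by simp
      rw [hi1, hj1, hre4, ih ms.length (by omega) (pre ++ [compc y]) ms (compc x :: suf) rfl]
      simp

lemma filterMap_compA (l : List Char) :
    l.filterMap compA = (l.filter (fun c => compDict.contains c)).map compc := by
  induction l with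
  | nil => rfl
  | cons ch t ih =>
    rw [List.filterMap_cons, List.filter_cons, compA_eq]
    by_cases h : compDict.contains ch
    · simp [h, ih]
    · simp [h, ih]

lemma twoPtr_spec (l : List Char) :
    twoPtr l 0 ((l.length : Int) - 1) = l.reverse.map compc := by
  have := twoPtr_middle l.length [] l [] rfl
  simpa using this

theorem revCom_eq (word : String) : revCom word = revCom_alt word := by
  rw [revCom_eq_filterMap]
  unfold revCom_alt
  simp only []
  rw [twoPtr_spec]
  congr 1
  rw [← List.filter_reverse, filterMap_compA]

-- ===== VERDICT (by name: the statement is the Claim_ definition above) =====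
theorem revCom_spec : Claim_equal_revCom := by
  intro word _
  unfold Spec_revCom
  exact revCom_eq word
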